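-- pv_equiv track=rewrite | github.com/Yabkoy/YoutubeDataDownloader | src/main.py | getVideoID
-- ===== SOURCE A (Python) =====
-- def getVideoID(link):
--     pos = link.find("watch?v=")
--     if pos == -1:
--         return ""
--     pos += 8
--
--     videoID = ""
--     for i in link[pos:]:
--         if i == '&':
--             break
--         videoID += i
--     return videoID
-- ===== SOURCE B (Python) =====
-- def getVideoID(link):
--     parts = link.split("watch?v=", 1)
--     if len(parts) == 1:
--         return ""
--     return parts[1].split("&", 1)[0]
-- ===== Notes on version B (the rewrite author's own statement) =====
-- stated objective: idiomatic
-- what changed: Replaces the manual find + position arithmetic + character-accumulation loop with two maxsplit-1 str.split calls: split on the marker substring and take the head of the tail split at the first ampersand.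
import Mathlib
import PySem

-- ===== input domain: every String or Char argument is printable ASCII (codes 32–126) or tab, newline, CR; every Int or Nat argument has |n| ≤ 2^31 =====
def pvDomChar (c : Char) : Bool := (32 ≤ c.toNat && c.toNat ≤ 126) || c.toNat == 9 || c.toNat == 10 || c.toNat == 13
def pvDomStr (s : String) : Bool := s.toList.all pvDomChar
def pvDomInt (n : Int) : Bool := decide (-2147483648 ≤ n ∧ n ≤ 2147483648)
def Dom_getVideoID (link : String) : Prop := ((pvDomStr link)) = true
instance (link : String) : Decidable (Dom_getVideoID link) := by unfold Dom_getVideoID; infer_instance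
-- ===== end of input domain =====

-- B replaces A's manual find + index arithmetic + char-accumulation loop by two maxsplit-1 splits (simpler/idiomatic; no speed claim).

-- ===== PORT A =====
-- the 'for i in link[pos:]: if i == '&': break; videoID += i' loop, char by char
def getVideoID_loop : List Char → List Char → List Char
  | [], acc => acc
  | c :: rest, acc => if c = '&' then acc else getVideoID_loop rest (acc ++ [c])

def getVideoID (link : String) : String :=
  let pos := PySem.Str.find link "watch?v="
  if pos = -1 then ""
  else
    let pos := pos + 8
    String.mk (getVideoID_loop (PySem.List.slice link.toList (some pos) none) [])

-- ===== PORT B =====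
def getVideoID_alt (link : String) : String :=
  let parts := PySem.Chars.splitOnMax link.toList ("watch?v=".toList) 1
  if parts.length = 1 then ""
  else
    let rest := (PySem.List.pyGet? parts 1).getD []   -- parts[1]; in range by the length test
    String.mk ((PySem.List.pyGet? (PySem.Chars.splitOnMax rest ['&'] 1) 0).getD [])

-- ===== PRECONDITION & SPEC =====
def Spec_getVideoID (link : String) (out : String) : Prop := out = getVideoID_alt link
instance (link : String) (out : String) : Decidable (Spec_getVideoID link out) := by unfold Spec_getVideoID; infer_instance

-- ===== CLAIM (what is proved, stated in full; the proofs are below) =====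
def Claim_equal_getVideoID : Prop := ∀ (link : String), Dom_getVideoID link → Spec_getVideoID link (getVideoID link)

-- ===== LEMMAS AND PROOFS =====

theorem find_go_nonneg (sub : List Char) (l : List Char) (k : Nat) :
    PySem.Chars.find.go sub l k = -1 ∨ (k : Int) ≤ PySem.Chars.find.go sub l k := by
  induction l generalizing k with
  | nil => rw [PySem.Chars.find.go]; split_ifs <;> simp
  | cons c t ih =>
    rw [PySem.Chars.find.go]
    by_cases hp : sub.isPrefixOf (c :: t)
    · simp [hp]
    · simp only [hp, if_false]
      rcases ih (k+1) with h | h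
      · exact Or.inl h
      · right; have : ((k:Int)) ≤ ((k+1 : Nat) : Int) := by push_cast; omega
        omega

theorem find_go_shift (sub : List Char) (l : List Char) (k : Nat) :
    PySem.Chars.find.go sub l k =
      if PySem.Chars.find.go sub l 0 = -1 then -1 else (k : Int) + PySem.Chars.find.go sub l 0 := by
  induction l generalizing k with
  | nil => rw [PySem.Chars.find.go, PySem.Chars.find.go]; split_ifs <;> simp_all
  | cons c t ih =>
    rw [PySem.Chars.find.go]
    conv_rhs => rw [PySem.Chars.find.go]
    by_cases hp : sub.isPrefixOf (c :: t)
    · simp [hp]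
    · simp only [if_neg hp]
      rw [ih (k+1), ih 1]
      by_cases h0 : PySem.Chars.find.go sub t 0 = -1
      · simp [h0]
      · rcases find_go_nonneg sub t 0 with h | h
        · exact absurd h h0
        · simp only [Nat.cast_one] at *
          have h1 : ¬((1:Int) + PySem.Chars.find.go sub t 0 = -1) := by omega
          rw [if_neg h0, if_neg h0, if_neg h1]
          push_cast; ring

-- go with maxsplit 0 flushes immediately
theorem splitOnMax_go_zero (sep : List Char) (f : Nat) (l cur : List Char) (acc : List (List Char)) :
    PySem.Chars.splitOnMax.go sep (f + 1) 0 l cur acc = ((cur.reverse ++ l) :: acc).reverse := by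
  cases l with
  | nil => rw [PySem.Chars.splitOnMax.go]; simp; omega
  | cons c rest => rw [PySem.Chars.splitOnMax.go]; simp

-- maxsplit-1 split characterised by find
theorem splitOnMax_go_one (sep : List Char) (hsep : sep ≠ []) :
    ∀ (l : List Char) (f : Nat) (cur : List Char) (acc : List (List Char)), l.length < f →
    PySem.Chars.splitOnMax.go sep f 1 l cur acc =
      if PySem.Chars.find.go sep l 0 = -1 then ((cur.reverse ++ l) :: acc).reverse
      else acc.reverse ++ [cur.reverse ++ l.take (PySem.Chars.find.go sep l 0).toNat,
                           l.drop ((PySem.Chars.find.go sep l 0).toNat + sep.length)] := by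
  intro l
  induction l with
  | nil =>
    intro f cur acc hf
    obtain ⟨f', rfl⟩ : ∃ f', f = f' + 1 := ⟨f - 1, by omega⟩
    rw [PySem.Chars.splitOnMax.go]
    rw [PySem.Chars.find.go]
    simp [List.isEmpty_iff, hsep]
    omega
  | cons c rest ih =>
    intro f cur acc hf
    obtain ⟨f', rfl⟩ : ∃ f', f = f' + 1 := ⟨f - 1, by omega⟩
    rw [PySem.Chars.splitOnMax.go]
    conv_rhs => rw [PySem.Chars.find.go]
    by_cases hp : sep.isPrefixOf (c :: rest)
    · simp only [if_pos hp, OfNat.one_ne_ofNat, if_false]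
      obtain ⟨f'', rfl⟩ : ∃ f'', f' = f'' + 1 := ⟨f' - 1, by have h9 : (c :: rest).length = rest.length + 1 := rfl; omega⟩
      rw [splitOnMax_go_zero]
      norm_num
    · simp only [if_neg hp, OfNat.one_ne_ofNat, if_false]
      rw [ih f' (c :: cur) acc (by have h9 : (c :: rest).length = rest.length + 1 := rfl; omega)]
      rw [find_go_shift sep rest 1]
      simp only [Nat.cast_one]
      by_cases h0 : PySem.Chars.find.go sep rest 0 = -1
      · simp [h0]
      · rcases find_go_nonneg sep rest 0 with h | h
        · exact absurd h h0
        · have hne : (1 : Int) + PySem.Chars.find.go sep rest 0 ≠ -1 := by omega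
          simp only [h0, if_false, hne, if_false]
          have htn : ((1 : Int) + PySem.Chars.find.go sep rest 0).toNat
              = (PySem.Chars.find.go sep rest 0).toNat + 1 := by omega
          simp only [htn, List.take_succ_cons]
          rw [show (PySem.Chars.find.go sep rest 0).toNat + 1 + sep.length
              = ((PySem.Chars.find.go sep rest 0).toNat + sep.length) + 1 from by omega,
            List.drop_succ_cons]
          simp

theorem splitOnMax_one (sep : List Char) (hsep : sep ≠ []) (l : List Char) :
    PySem.Chars.splitOnMax l sep 1 =
      if PySem.Chars.find l sep = -1 then [l]
      else [l.take (PySem.Chars.find l sep).toNat,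
            l.drop ((PySem.Chars.find l sep).toNat + sep.length)] := by
  rw [PySem.Chars.splitOnMax]
  simp only [PySem.Chars.find]
  rw [if_neg (by omega), Int.toNat_one, splitOnMax_go_one sep hsep l (l.length + 1) [] [] (by omega)]
  split_ifs <;> simp

-- single-char find vs takeWhile
theorem find_single_takeWhile (a : Char) (l : List Char) :
    (if PySem.Chars.find.go [a] l 0 = -1 then l else l.take (PySem.Chars.find.go [a] l 0).toNat)
      = l.takeWhile (· ≠ a) := by
  induction l with
  | nil => rw [PySem.Chars.find.go]; simp
  | cons c t ih =>
    rw [PySem.Chars.find.go]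
    by_cases hc : c = a
    · subst hc
      have hp : [c].isPrefixOf (c :: t) = true := by simp [List.isPrefixOf]
      simp [hp, List.takeWhile]
    · have hp : [a].isPrefixOf (c :: t) = false := by simp [List.isPrefixOf]; exact fun h => hc h.symm
      simp only [hp, Bool.false_eq_true, if_false]
      rw [find_go_shift [a] t 1]
      simp only [Nat.cast_one]
      by_cases h0 : PySem.Chars.find.go [a] t 0 = -1
      · simp only [h0, if_true, if_pos rfl]
        rw [List.takeWhile_cons_of_pos (by simp [hc])]
        rw [← ih]; simp [h0]
      · rcases find_go_nonneg [a] t 0 with h | h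
        · exact absurd h h0
        · have hne : (1 : Int) + PySem.Chars.find.go [a] t 0 ≠ -1 := by omega
          simp only [h0, if_false, hne, if_false]
          have htn : ((1 : Int) + PySem.Chars.find.go [a] t 0).toNat
              = (PySem.Chars.find.go [a] t 0).toNat + 1 := by omega
          rw [htn, List.take_succ_cons, List.takeWhile_cons_of_pos (by simp [hc])]
          rw [← ih]; simp [h0]

theorem loop_eq_takeWhile (l acc : List Char) :
    getVideoID_loop l acc = acc ++ l.takeWhile (· ≠ '&') := by
  induction l generalizing acc with
  | nil => simp [getVideoID_loop]
  | cons c t ih =>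
    by_cases hc : c = '&'
    · subst hc; simp [getVideoID_loop, List.takeWhile]
    · rw [getVideoID_loop, if_neg hc, ih, List.takeWhile_cons_of_pos (by simp [hc])]
      simp

-- ===== VERDICT (by name: the statement is the Claim_ definition above) =====
theorem pyGet_pair (a b : List Char) : (PySem.List.pyGet? [a, b] (1 : Int)).getD [] = b := by
  simp [PySem.List.pyGet?, PySem.List.pyIdx?]

theorem amp_head (r : List Char) :
    (PySem.List.pyGet? (PySem.Chars.splitOnMax r ['&'] 1) 0).getD [] = r.takeWhile (· ≠ '&') := by
  rw [splitOnMax_one _ (by decide : (['&'] : List Char) ≠ [])]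
  have h := find_single_takeWhile '&' r
  have hfg : PySem.Chars.find r ['&'] = PySem.Chars.find.go ['&'] r 0 := rfl
  by_cases hA : PySem.Chars.find.go ['&'] r 0 = -1
  · rw [hfg, if_pos hA]
    simp only [PySem.List.pyGet?, PySem.List.pyIdx?]
    rw [← h, if_pos hA]
    simp
  · rw [hfg, if_neg hA]
    simp only [PySem.List.pyGet?, PySem.List.pyIdx?]
    rw [← h, if_neg hA]
    simp

theorem getVideoID_spec : Claim_equal_getVideoID := by
  intro link _
  unfold Spec_getVideoID getVideoID getVideoID_alt
  have hsepne : ("watch?v=".toList) ≠ [] := by decide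
  rw [splitOnMax_one _ hsepne]
  simp only [PySem.Str.find_eq]
  by_cases hF : PySem.Chars.find link.toList "watch?v=".toList = -1
  · simp only [hF]
    simp
  · have h : (0:Int) ≤ PySem.Chars.find link.toList "watch?v=".toList := by
      rcases find_go_nonneg "watch?v=".toList link.toList 0 with h | h
      · exact absurd h hF
      · simpa using h
    simp only [if_neg hF]
    rw [loop_eq_takeWhile]
    rw [PySem.List.slice_from link.toList (by omega : (0:Int) ≤ PySem.Chars.find link.toList "watch?v=".toList + 8)]
    have hl : ("watch?v=".toList).length = 8 := by decide
    have htn : (PySem.Chars.find link.toList "watch?v=".toList + 8).toNat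
        = (PySem.Chars.find link.toList "watch?v=".toList).toNat + ("watch?v=".toList).length := by
      rw [hl]; omega
    rw [htn]
    rw [if_neg (by simp)]
    rw [pyGet_pair]
    rw [amp_head]
    simp
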